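-- pv_equiv track=rewrite | github.com/GU-Cryptography/exds-web | scripts/check_auth_frontend.py | _scan_regex_literal
-- ===== SOURCE A (Python) =====
-- def _scan_regex_literal(text: str, slash_index: int) -> tuple[str, int] | None:
--     if slash_index < 0 or slash_index >= len(text) or text[slash_index] != "/":
--         return None
--     i = slash_index + 1
--     escaped = False
--     in_class = False
--     out_chars: list[str] = []
--     while i < len(text):
--         ch = text[i]
--         if escaped:
--             out_chars.append(ch)
--             escaped = False
--         elif ch == "\\":
--             out_chars.append(ch)
--             escaped = True
--         elif ch == "[":
--             out_chars.append(ch)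
--             in_class = True
--         elif ch == "]":
--             out_chars.append(ch)
--             in_class = False
--         elif ch == "/" and not in_class:
--             j = i + 1
--             while j < len(text) and text[j].isalpha():
--                 j += 1
--             return "".join(out_chars), j
--         else:
--             out_chars.append(ch)
--         i += 1
--     return None
-- ===== SOURCE B (Python) =====
-- def _scan_regex_literal(text: str, slash_index: int) -> tuple[str, int] | None:
--     # The body of the literal is exactly the slice text[slash_index+1:end], so we
--     # only locate the terminating '/' (no output accumulator) and slice at the end.
--     if slash_index < 0 or slash_index >= len(text) or text[slash_index] != "/":
--         return None
--     n = len(text)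
--     end = -1
--     in_class = False
--     i = slash_index + 1
--     while i < n:
--         ch = text[i]
--         if ch == "\\":
--             i += 2
--             continue
--         if ch == "[":
--             in_class = True
--         elif ch == "]":
--             in_class = False
--         elif ch == "/" and not in_class:
--             end = i
--             break
--         i += 1
--     if end < 0:
--         return None
--     j = end + 1
--     while j < n and text[j].isalpha():
--         j += 1
--     return text[slash_index + 1:end], j
-- ===== Notes on version B (the rewrite author's own statement) =====
-- stated objective: simpler
-- what changed: B does not build the output character by character: it only locates the index of the terminating '/' (tracking the class flag and jumping 2 on a backslash), then returns the body as a single slice text[slash_index+1:end] plus the flag-run end; A accumulates out_chars on every iteration and joins them.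
import Mathlib
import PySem

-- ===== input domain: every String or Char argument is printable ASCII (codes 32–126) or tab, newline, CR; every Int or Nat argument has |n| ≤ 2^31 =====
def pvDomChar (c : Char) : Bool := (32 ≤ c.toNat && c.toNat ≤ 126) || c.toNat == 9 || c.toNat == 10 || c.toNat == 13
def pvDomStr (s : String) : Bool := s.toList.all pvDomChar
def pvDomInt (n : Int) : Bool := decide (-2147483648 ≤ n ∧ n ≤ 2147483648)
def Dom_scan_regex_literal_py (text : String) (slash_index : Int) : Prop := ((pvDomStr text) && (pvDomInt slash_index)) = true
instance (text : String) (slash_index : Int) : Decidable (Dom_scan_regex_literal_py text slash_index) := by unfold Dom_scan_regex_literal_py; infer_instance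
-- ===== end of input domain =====

-- B replaces A's per-character output accumulator by an end-index search: it only finds the
-- terminating '/' and returns the body as one slice text[slash_index+1:end]. Objective: simpler.

-- ===== PORT A =====
-- the inner 'while j < len(text) and text[j].isalpha(): j += 1' loop: length of the alpha run
def pvAlphaRun : List Char → Nat
  | [] => 0
  | c :: cs => if PySem.Chars.isalpha c then pvAlphaRun cs + 1 else 0

-- the main while loop of A: rest = text[i:], carrying i, escaped, in_class, out_chars
def pvScanA : List Char → Nat → Bool → Bool → List Char → Option (String × Int)
  | [], _, _, _, _ => none
  | ch :: rest, i, escaped, in_class, out =>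
    if escaped then pvScanA rest (i + 1) false in_class (out ++ [ch])
    else if ch = '\\' then pvScanA rest (i + 1) true in_class (out ++ [ch])
    else if ch = '[' then pvScanA rest (i + 1) false true (out ++ [ch])
    else if ch = ']' then pvScanA rest (i + 1) false false (out ++ [ch])
    else if ch = '/' ∧ in_class = false then
      some (String.ofList out, ((i : Int) + 1 + (pvAlphaRun rest : Int)))
    else pvScanA rest (i + 1) escaped in_class (out ++ [ch])

def scan_regex_literal_py (text : String) (slash_index : Int) : Option (String × Int) :=
  if slash_index < 0 ∨ (text.toList.length : Int) ≤ slash_index then none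
  else if (text.toList.drop slash_index.toNat).head? ≠ some '/' then none
  else pvScanA (text.toList.drop (slash_index.toNat + 1)) (slash_index.toNat + 1) false false []

-- ===== PORT B =====
-- B's search loop: returns only the index of the terminating '/'; '\\' jumps two positions
-- ('i += 2; continue' = skip the next character too, if any)
def pvFindEnd : List Char → Nat → Bool → Option Nat
  | [], _, _ => none
  | ch :: rest, i, in_class =>
    if ch = '\\' then pvFindEnd (rest.drop 1) (i + 2) in_class
    else if ch = '[' then pvFindEnd rest (i + 1) true
    else if ch = ']' then pvFindEnd rest (i + 1) false
    else if ch = '/' ∧ in_class = false then some i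
    else pvFindEnd rest (i + 1) in_class
termination_by rest _ _ => rest.length
decreasing_by all_goals (simp; try omega)

def scan_regex_literal_py_alt (text : String) (slash_index : Int) : Option (String × Int) :=
  if slash_index < 0 ∨ (text.toList.length : Int) ≤ slash_index then none
  else if (text.toList.drop slash_index.toNat).head? ≠ some '/' then none
  else
    match pvFindEnd (text.toList.drop (slash_index.toNat + 1)) (slash_index.toNat + 1) false with
    | none => none
    | some e =>
      some (String.ofList ((text.toList.drop (slash_index.toNat + 1)).take (e - (slash_index.toNat + 1))),
            ((e : Int) + 1 + (pvAlphaRun (text.toList.drop (e + 1)) : Int)))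

-- ===== PRECONDITION & SPEC =====
def Spec_scan_regex_literal_py (text : String) (slash_index : Int) (out : Option (String × Int)) : Prop := out = scan_regex_literal_py_alt text slash_index
instance (text : String) (slash_index : Int) (out : Option (String × Int)) : Decidable (Spec_scan_regex_literal_py text slash_index out) := by unfold Spec_scan_regex_literal_py; infer_instance

-- ===== CLAIM (what is proved, stated in full; the proofs are below) =====
def Claim_equal_scan_regex_literal_py : Prop := ∀ (text : String) (slash_index : Int), Dom_scan_regex_literal_py text slash_index → Spec_scan_regex_literal_py text slash_index (scan_regex_literal_py text slash_index)

-- ===== LEMMAS AND PROOFS =====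
theorem pvFindEnd_ge : ∀ (rest : List Char) (i : Nat) (ic : Bool) (e : Nat),
    pvFindEnd rest i ic = some e → i ≤ e
  | [], _, _, _ => by simp [pvFindEnd]
  | ch :: rest, i, ic, e => by
    rw [pvFindEnd.eq_def]
    dsimp only
    split_ifs with h1 h2 h3 h4
    · intro h; exact le_trans (by omega) (pvFindEnd_ge _ _ _ _ h)
    · intro h; exact le_trans (by omega) (pvFindEnd_ge _ _ _ _ h)
    · intro h; exact le_trans (by omega) (pvFindEnd_ge _ _ _ _ h)
    · intro h; simp at h; omega
    · intro h; exact le_trans (by omega) (pvFindEnd_ge _ _ _ _ h)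
termination_by rest _ _ _ => rest.length
decreasing_by all_goals (simp; try omega)

-- A's loop computes exactly what B's end-search plus slicing computes
theorem pvScanA_eq_find : ∀ (rest : List Char) (i : Nat) (ic : Bool) (out : List Char),
    pvScanA rest i false ic out =
      (pvFindEnd rest i ic).map (fun e =>
        (String.ofList (out ++ rest.take (e - i)),
         ((e : Int) + 1 + (pvAlphaRun (rest.drop (e - i + 1)) : Int))))
  | [], _, _, _ => by simp [pvScanA, pvFindEnd]
  | ch :: rest, i, ic, out => by
    by_cases hb : ch = '\\'
    · subst hb
      match rest with
      | [] => simp [pvScanA, pvFindEnd]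
      | c2 :: rest2 =>
        have lhs_eq : pvScanA ('\\' :: c2 :: rest2) i false ic out
            = pvScanA rest2 (i + 2) false ic (out ++ ['\\', c2]) := by
          simp [pvScanA]
        have rhs_eq : pvFindEnd ('\\' :: c2 :: rest2) i ic = pvFindEnd rest2 (i + 2) ic := by
          simp [pvFindEnd]
        rw [lhs_eq, rhs_eq, pvScanA_eq_find rest2 (i + 2) ic (out ++ ['\\', c2])]
        cases hfe : pvFindEnd rest2 (i + 2) ic with
        | none => simp
        | some e =>
          have hge := pvFindEnd_ge _ _ _ _ hfe
          simp only [Option.map_some]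
          have h2 : e - i + 1 = (e - (i + 2) + 1) + 2 := by omega
          have h1 : e - i = (e - (i + 2)) + 2 := by omega
          rw [h2, h1]
          simp [List.take_succ_cons, List.drop_succ_cons]
    · have step : ∀ (ic' : Bool),
        pvScanA rest (i + 1) false ic' (out ++ [ch]) =
          (pvFindEnd rest (i + 1) ic').map (fun e =>
            (String.ofList (out ++ (ch :: rest).take (e - i)),
             ((e : Int) + 1 + (pvAlphaRun ((ch :: rest).drop (e - i + 1)) : Int)))) := by
        intro ic'
        rw [pvScanA_eq_find rest (i + 1) ic' (out ++ [ch])]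
        cases hfe : pvFindEnd rest (i + 1) ic' with
        | none => simp
        | some e =>
          have hge := pvFindEnd_ge _ _ _ _ hfe
          simp only [Option.map_some]
          have h2 : e - i + 1 = (e - (i + 1) + 1) + 1 := by omega
          have h1 : e - i = (e - (i + 1)) + 1 := by omega
          rw [h2, h1]
          simp [List.take_succ_cons, List.drop_succ_cons]
      rw [pvScanA.eq_def, pvFindEnd.eq_def]
      dsimp only
      simp only [Bool.false_eq_true, if_false, if_neg hb]
      split_ifs with h2 h3 h4
      · rw [step true]
      · rw [step false]
      · simp only [Option.map_some]
        simp
      · rw [step ic]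
termination_by rest _ _ _ => rest.length

-- ===== VERDICT (by name: the statement is the Claim_ definition above) =====
theorem scan_regex_literal_py_spec : Claim_equal_scan_regex_literal_py := by
  intro text slash_index _
  unfold Spec_scan_regex_literal_py scan_regex_literal_py scan_regex_literal_py_alt
  split_ifs
  · rfl
  · rfl
  · rw [pvScanA_eq_find]
    cases hfe : pvFindEnd (text.toList.drop (slash_index.toNat + 1)) (slash_index.toNat + 1) false with
    | none => simp
    | some e =>
      have hge := pvFindEnd_ge _ _ _ _ hfe
      have harith : e - (slash_index.toNat + 1) + 1 + (slash_index.toNat + 1) = e + 1 := by omega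
      simp [List.drop_drop]
      congr 2
      omega
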